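-- pv_equiv track=rewrite | github.com/Estherrrrr799/COMP4037-CW2 | hospital_data/scan_all.py | find_summary_sheet
-- ===== SOURCE A (Python) =====
-- def find_summary_sheet(sheetnames):
--     """
--     Select the most likely summary sheet from a workbook's sheet list.
--     Prefers sheets containing 'summary'; falls back to sheets containing
--     'diag' (excluding introduction sheets).
--     """
--     for s in sheetnames:
--         if 'summary' in s.lower():
--             return s
--     for s in sheetnames:
--         if 'diag' in s.lower() and 'intro' not in s.lower():
--             return s
--     return sheetnames[0]
-- ===== SOURCE B (Python) =====
-- def find_summary_sheet(sheetnames):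
--     """Single pass: return immediately on a 'summary' sheet; remember the
--     first acceptable 'diag' sheet as a fallback candidate."""
--     diag = None
--     for s in sheetnames:
--         t = s.lower()
--         if 'summary' in t:
--             return s
--         if diag is None and 'diag' in t and 'intro' not in t:
--             diag = s
--     return diag if diag is not None else sheetnames[0]
-- ===== Notes on version B (the rewrite author's own statement) =====
-- stated objective: simpler
-- what changed: Replaces A's two sequential priority scans with one traversal that returns on the first 'summary' hit and carries the first acceptable 'diag' sheet as a fallback candidate.
import Mathlib
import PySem

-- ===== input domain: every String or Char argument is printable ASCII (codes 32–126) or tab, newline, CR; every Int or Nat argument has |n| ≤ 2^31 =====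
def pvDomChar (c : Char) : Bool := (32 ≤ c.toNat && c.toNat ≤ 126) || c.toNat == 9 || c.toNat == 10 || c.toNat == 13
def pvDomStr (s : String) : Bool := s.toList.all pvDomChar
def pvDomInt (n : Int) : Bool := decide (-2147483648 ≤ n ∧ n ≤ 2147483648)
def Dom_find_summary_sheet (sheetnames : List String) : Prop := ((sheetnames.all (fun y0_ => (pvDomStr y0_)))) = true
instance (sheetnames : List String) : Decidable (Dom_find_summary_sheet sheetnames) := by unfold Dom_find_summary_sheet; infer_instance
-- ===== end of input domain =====

-- B replaces A's two sequential priority scans by one traversal carrying a fallback candidate (simpler; same cost).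

-- ===== PORT A =====
-- A: first scan for 'summary', then scan for 'diag' without 'intro', else sheetnames[0].
def find_summary_sheet (sheetnames : List String) : String :=
  match sheetnames.find? (fun s => PySem.Str.isIn "summary" (PySem.Str.lower s)) with
  | some s => s
  | none =>
    match sheetnames.find? (fun s =>
        PySem.Str.isIn "diag" (PySem.Str.lower s) && !PySem.Str.isIn "intro" (PySem.Str.lower s)) with
    | some s => s
    | none => (PySem.List.pyGet? sheetnames 0).getD ""  -- IndexError on []; excluded by Pre_

-- ===== PORT B =====
-- one pass; `diag` is the recorded fallback candidate; returns (some s) on a summary hit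
def find_summary_sheet_altLoop : List String → Option String → Option String
  | [], diag => diag
  | s :: rest, diag =>
    let t := PySem.Str.lower s
    if PySem.Str.isIn "summary" t then some s
    else if diag.isNone && PySem.Str.isIn "diag" t && !PySem.Str.isIn "intro" t then
      find_summary_sheet_altLoop rest (some s)
    else
      find_summary_sheet_altLoop rest diag

def find_summary_sheet_alt (sheetnames : List String) : String :=
  match find_summary_sheet_altLoop sheetnames none with
  | some s => s
  | none => (PySem.List.pyGet? sheetnames 0).getD ""  -- IndexError on []; excluded by Pre_

-- ===== PRECONDITION & SPEC =====
-- Pre_ excludes only the empty list, on which A (and B) raise IndexError at sheetnames[0].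
def Pre_find_summary_sheet (sheetnames : List String) : Prop := sheetnames ≠ []
instance (sheetnames : List String) : Decidable (Pre_find_summary_sheet sheetnames) := by
  unfold Pre_find_summary_sheet; infer_instance
def pvWitness_find_summary_sheet : List String := (["Intro", "Diag 2021", "Notes"])

def Spec_find_summary_sheet (sheetnames : List String) (out : String) : Prop :=
  out = find_summary_sheet_alt sheetnames
instance (sheetnames : List String) (out : String) : Decidable (Spec_find_summary_sheet sheetnames out) := by
  unfold Spec_find_summary_sheet; infer_instance

-- ===== CLAIM (what is proved, stated in full; the proofs are below) =====
def Claim_equal_find_summary_sheet : Prop := ∀ (sheetnames : List String),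
  Dom_find_summary_sheet sheetnames → Pre_find_summary_sheet sheetnames →
  Spec_find_summary_sheet sheetnames (find_summary_sheet sheetnames)

-- ===== LEMMAS AND PROOFS =====
lemma altLoop_eq (xs : List String) (diag : Option String) :
    find_summary_sheet_altLoop xs diag =
      match xs.find? (fun s => PySem.Str.isIn "summary" (PySem.Str.lower s)) with
      | some s => some s
      | none =>
        match diag with
        | some d => some d
        | none => xs.find? (fun s =>
            PySem.Str.isIn "diag" (PySem.Str.lower s) && !PySem.Str.isIn "intro" (PySem.Str.lower s)) := by
  induction xs generalizing diag with
  | nil => cases diag <;> rfl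
  | cons s rest ih =>
    simp only [find_summary_sheet_altLoop, List.find?]
    cases hsum : PySem.Str.isIn "summary" (PySem.Str.lower s) with
    | true => simp only [if_true]
    | false =>
      simp only [Bool.false_eq_true, if_false]
      cases diag with
      | some d =>
        simp only [Option.isNone_some, Bool.false_and, Bool.false_eq_true, if_false, ih]
      | none =>
        cases hd : (PySem.Str.isIn "diag" (PySem.Str.lower s)
            && !PySem.Str.isIn "intro" (PySem.Str.lower s)) with
        | true =>
          simp only [Option.isNone_none, Bool.true_and, hd, if_true, ih]
        | false =>
          simp only [Option.isNone_none, Bool.true_and, hd, Bool.false_eq_true, if_false, ih]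

-- ===== VERDICT (by name: the statement is the Claim_ definition above) =====
theorem find_summary_sheet_spec : Claim_equal_find_summary_sheet := by
  intro xs _ _
  unfold Spec_find_summary_sheet find_summary_sheet find_summary_sheet_alt
  rw [altLoop_eq]
  cases xs.find? (fun s => PySem.Str.isIn "summary" (PySem.Str.lower s)) with
  | some s => rfl
  | none =>
    cases xs.find? (fun s =>
        PySem.Str.isIn "diag" (PySem.Str.lower s) && !PySem.Str.isIn "intro" (PySem.Str.lower s)) with
    | some s => rfl
    | none => rfl
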